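-- pv_equiv track=rewrite | github.com/OscarTaboada/SIS420-2021 | 6.-A_Genetico/lab6_Grupo2.py | funcion1
-- ===== SOURCE A (Python) =====
-- def funcion1(cromosoma):
--    suma = 0
--    for j in range(len(cromosoma)):
--        if(cromosoma[j]==1):
--            suma+=0
--        else:
--            suma+=10
--    return suma
-- ===== SOURCE B (Python) =====
-- def funcion1(cromosoma):
--     return 10 * (len(cromosoma) - cromosoma.count(1))
-- ===== Notes on version B (the rewrite author's own statement) =====
-- stated objective: simpler
-- what changed: Replaced the per-element accumulation loop with a closed form: 10 * (len - count of 1s).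
import Mathlib
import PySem

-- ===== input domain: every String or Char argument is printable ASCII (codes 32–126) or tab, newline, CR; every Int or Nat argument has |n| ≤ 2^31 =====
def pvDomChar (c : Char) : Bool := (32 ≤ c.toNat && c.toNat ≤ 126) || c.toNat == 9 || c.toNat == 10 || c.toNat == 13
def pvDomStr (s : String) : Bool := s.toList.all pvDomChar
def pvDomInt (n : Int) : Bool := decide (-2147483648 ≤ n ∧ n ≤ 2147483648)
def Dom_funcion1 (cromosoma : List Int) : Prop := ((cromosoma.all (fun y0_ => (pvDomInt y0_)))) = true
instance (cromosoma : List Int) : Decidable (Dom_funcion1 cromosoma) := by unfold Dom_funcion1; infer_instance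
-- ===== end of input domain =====

-- B replaces A's per-element accumulation loop by the closed form 10 * (len - count 1) (objective: simpler).

-- ===== PORT A =====
-- for j in range(len(cromosoma)): if cromosoma[j]==1 then suma+=0 else suma+=10
def funcion1 (cromosoma : List Int) : Int :=
  (PySem.List.pyRange 0 (cromosoma.length) 1).foldl
    (fun suma j =>
      if PySem.List.pyGetD cromosoma j 0 = 1 then suma + 0 else suma + 10) 0

-- ===== PORT B =====
-- return 10 * (len(cromosoma) - cromosoma.count(1))
def funcion1_alt (cromosoma : List Int) : Int :=
  10 * ((cromosoma.length : Int) - PySem.List.count cromosoma 1)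

-- ===== PRECONDITION & SPEC =====
def Spec_funcion1 (cromosoma : List Int) (out : Int) : Prop := out = funcion1_alt cromosoma
instance (cromosoma : List Int) (out : Int) : Decidable (Spec_funcion1 cromosoma out) := by unfold Spec_funcion1; infer_instance

-- ===== CLAIM (what is proved, stated in full; the proofs are below) =====
def Claim_equal_funcion1 : Prop := ∀ (cromosoma : List Int), Dom_funcion1 cromosoma → Spec_funcion1 cromosoma (funcion1 cromosoma)

-- ===== LEMMAS AND PROOFS =====
theorem funcion1_eq_alt (cromosoma : List Int) :
    funcion1 cromosoma = funcion1_alt cromosoma := by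
  unfold funcion1 funcion1_alt
  rw [PySem.List.foldl_pyRange_zero_pyGetD' (f := fun suma v => if v = 1 then suma + 0 else suma + 10) (xs := cromosoma) (d := 0) (init := 0)]
  rw [PySem.List.count_eq]
  induction cromosoma using List.reverseRecOn with
  | nil => simp
  | append_singleton xs x ih =>
    rw [List.foldl_append, List.count_append]
    simp only [List.foldl_cons, List.foldl_nil, ih]
    by_cases h : x = 1 <;>
      simp [h, List.count_singleton] <;> push_cast <;> ring

-- ===== VERDICT (by name: the statement is the Claim_ definition above) =====
theorem funcion1_spec : Claim_equal_funcion1 := by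
  intro cromosoma _
  exact funcion1_eq_alt cromosoma
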